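-- pv_equiv track=rewrite | github.com/HAHAHAHA123456/MyUtils | LeTou_StaticFunc.py | staticLotteryNumberWithInfo
-- ===== SOURCE A (Python) =====
-- def staticCounts_Continous_leaveOutFindMax(dataList, continousInfo, leaveOutInfo, number):
--     idx = 0
--     countsNumber = 0
--     maxContinous = 0
--     maxLeaveNumber = 0
--     while idx < len(dataList):
--         if number in dataList[idx]:
--             countsNumber += 1
--         if idx != len(dataList) - 1:
--             if continousInfo[idx][number - 1] > maxContinous:
--                 maxContinous = continousInfo[idx][number - 1]
--             if leaveOutInfo[idx][number - 1] > maxLeaveNumber: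
--                 maxLeaveNumber = leaveOutInfo[idx][number - 1]
--         idx += 1
--     return countsNumber, maxContinous, maxLeaveNumber
--
-- def staticLotteryNumberWithInfo(dataList, continousInfo, leaveOutInfo):
--     staticInfo_dict = {}
--     for i in range(1, 36):
--         tempDict = {}
--         countsNumber, maxContinous, maxLeaveNumber = staticCounts_Continous_leaveOutFindMax(dataList=dataList, continousInfo = continousInfo, leaveOutInfo = leaveOutInfo, number=i)
--         tempDict['countsNumber'] = countsNumber
--         tempDict['maxContinous'] = maxContinous
--         tempDict['maxLeaveNumber'] = maxLeaveNumber
--         staticInfo_dict[str(i)] = tempDict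
--     return staticInfo_dict
-- ===== SOURCE B (Python) =====
-- def staticLotteryNumberWithInfo(dataList, continousInfo, leaveOutInfo):
--     n = len(dataList)
--     counts = [0] * 36
--     for row in dataList:
--         for x in set(row):
--             if 1 <= x <= 35:
--                 counts[x] += 1
--     maxC = [0] * 35
--     maxL = [0] * 35
--     for idx in range(n - 1):
--         maxC = [max(m, v) for m, v in zip(maxC, continousInfo[idx])]
--         maxL = [max(m, v) for m, v in zip(maxL, leaveOutInfo[idx])]
--     return {str(i): {'countsNumber': counts[i],
--                      'maxContinous': maxC[i - 1],
--                      'maxLeaveNumber': maxL[i - 1]}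
--             for i in range(1, 36)}
-- ===== Notes on version B (the rewrite author's own statement) =====
-- stated objective: faster
-- what changed: A scans dataList and both info tables once per lottery number (35 full passes via a helper while-loop); B makes a single pass maintaining a 36-entry count array (incremented per distinct row element via set(row)) and running per-column max arrays updated row-wise with zip, then assembles the same nested dict.
import Mathlib
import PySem

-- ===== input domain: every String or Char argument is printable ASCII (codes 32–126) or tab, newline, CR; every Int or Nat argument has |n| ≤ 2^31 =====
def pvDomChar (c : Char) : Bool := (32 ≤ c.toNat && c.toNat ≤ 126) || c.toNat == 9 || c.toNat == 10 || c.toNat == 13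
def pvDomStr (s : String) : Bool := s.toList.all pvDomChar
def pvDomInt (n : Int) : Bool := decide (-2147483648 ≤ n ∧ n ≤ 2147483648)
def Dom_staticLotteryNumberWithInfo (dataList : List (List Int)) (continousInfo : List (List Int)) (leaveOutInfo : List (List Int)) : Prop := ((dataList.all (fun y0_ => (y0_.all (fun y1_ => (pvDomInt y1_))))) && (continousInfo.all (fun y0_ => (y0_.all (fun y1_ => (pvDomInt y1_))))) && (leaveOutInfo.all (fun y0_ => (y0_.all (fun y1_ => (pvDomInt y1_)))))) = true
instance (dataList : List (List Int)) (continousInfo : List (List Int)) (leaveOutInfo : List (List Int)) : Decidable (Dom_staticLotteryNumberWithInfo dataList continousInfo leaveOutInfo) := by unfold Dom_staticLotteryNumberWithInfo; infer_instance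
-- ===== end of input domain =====

-- B replaces A's 35 full scans of dataList (one per lottery number) by a single pass
-- maintaining per-number count and per-column running-max arrays (objective: faster, constant factor).

-- ===== PORT A =====
-- while-loop of staticCounts_Continous_leaveOutFindMax, transliterated with idx as the loop counter
def aLoop (dataList continousInfo leaveOutInfo : List (List Int)) (number : Int)
    (idx : Nat) (countsNumber maxContinous maxLeaveNumber : Int) : Int × Int × Int :=
  if h : idx < dataList.length then
    let countsNumber := if number ∈ dataList[idx] then countsNumber + 1 else countsNumber
    let maxContinous :=
      if idx ≠ dataList.length - 1 then
        let v := PySem.List.pyGetD (PySem.List.pyGetD continousInfo (idx : Int) []) (number - 1) 0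
        if v > maxContinous then v else maxContinous
      else maxContinous
    let maxLeaveNumber :=
      if idx ≠ dataList.length - 1 then
        let v := PySem.List.pyGetD (PySem.List.pyGetD leaveOutInfo (idx : Int) []) (number - 1) 0
        if v > maxLeaveNumber then v else maxLeaveNumber
      else maxLeaveNumber
    aLoop dataList continousInfo leaveOutInfo number (idx + 1) countsNumber maxContinous maxLeaveNumber
  else (countsNumber, maxContinous, maxLeaveNumber)
termination_by dataList.length - idx

def staticLotteryNumberWithInfo (dataList : List (List Int)) (continousInfo : List (List Int)) (leaveOutInfo : List (List Int)) : List (String × List (String × Int)) :=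
  ((PySem.List.pyRange 1 36 1).foldl (fun staticInfo_dict i =>
      let t := aLoop dataList continousInfo leaveOutInfo i 0 0 0 0
      let tempDict : PySem.Dict String Int :=
        ((PySem.Dict.empty.insert "countsNumber" t.1).insert "maxContinous" t.2.1).insert "maxLeaveNumber" t.2.2
      staticInfo_dict.insert (PySem.Int.toStr i) tempDict.items)
    (PySem.Dict.empty : PySem.Dict String (List (String × Int)))).items

-- ===== PORT B =====
-- 'for x in set(row): if 1 <= x <= 35: counts[x] += 1'  (increments commute, so PySem.Set order is exact)
def bIncRow (counts : List Int) (s : List Int) : List Int :=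
  s.foldl (fun cs x =>
      if 1 ≤ x ∧ x ≤ 35 then PySem.List.pySetD cs x (PySem.List.pyGetD cs x 0 + 1) else cs)
    counts

-- '[max(m, v) for m, v in zip(m, row)]'
def bMaxStep (m row : List Int) : List Int := (m.zip row).map (fun p => max p.1 p.2)

def staticLotteryNumberWithInfo_alt (dataList : List (List Int)) (continousInfo : List (List Int)) (leaveOutInfo : List (List Int)) : List (String × List (String × Int)) :=
  let n : Int := dataList.length
  let counts := dataList.foldl (fun cs row => bIncRow cs (PySem.Set.ofList row)) (List.replicate 36 0)
  let maxes := (PySem.List.pyRange 0 (n - 1) 1).foldl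
      (fun (p : List Int × List Int) idx =>
        (bMaxStep p.1 (PySem.List.pyGetD continousInfo idx []),
         bMaxStep p.2 (PySem.List.pyGetD leaveOutInfo idx [])))
      (List.replicate 35 0, List.replicate 35 0)
  -- dict comprehension over the distinct keys str(1) … str(35): its assoc list is this map
  (PySem.List.pyRange 1 36 1).map (fun i =>
    (PySem.Int.toStr i,
     [("countsNumber", PySem.List.pyGetD counts i 0),
      ("maxContinous", PySem.List.pyGetD maxes.1 (i - 1) 0),
      ("maxLeaveNumber", PySem.List.pyGetD maxes.2 (i - 1) 0)]))

-- ===== PRECONDITION & SPEC =====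
-- Pre_ is exactly where A returns: for every index idx < len(dataList)-1 A reads
-- continousInfo[idx][number-1] and leaveOutInfo[idx][number-1] for number = 1..35,
-- so those rows must exist and have length ≥ 35 (otherwise A raises IndexError).
def Pre_staticLotteryNumberWithInfo (dataList : List (List Int)) (continousInfo : List (List Int)) (leaveOutInfo : List (List Int)) : Prop :=
  dataList.length - 1 ≤ continousInfo.length ∧ dataList.length - 1 ≤ leaveOutInfo.length ∧
  (∀ r ∈ continousInfo.take (dataList.length - 1), 35 ≤ r.length) ∧
  (∀ r ∈ leaveOutInfo.take (dataList.length - 1), 35 ≤ r.length)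
instance (dataList : List (List Int)) (continousInfo : List (List Int)) (leaveOutInfo : List (List Int)) : Decidable (Pre_staticLotteryNumberWithInfo dataList continousInfo leaveOutInfo) := by unfold Pre_staticLotteryNumberWithInfo; infer_instance

def pvWitness_staticLotteryNumberWithInfo : List (List Int) × List (List Int) × List (List Int) :=
  ([[1, 7], [7]], [[2, 1, 0, 0, 0, 0, 0, 0, 0, 0, 0, 0, 0, 0, 0, 0, 0, 0, 0, 0, 0, 0, 0, 0, 0, 0, 0, 0, 0, 0, 0, 0, 0, 0, 3]],
   [[0, 5, 0, 0, 0, 0, 0, 0, 0, 0, 0, 0, 0, 0, 0, 0, 0, 0, 0, 0, 0, 0, 0, 0, 0, 0, 0, 0, 0, 0, 0, 0, 0, 0, 1]])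

def Spec_staticLotteryNumberWithInfo (dataList : List (List Int)) (continousInfo : List (List Int)) (leaveOutInfo : List (List Int)) (out : List (String × List (String × Int))) : Prop := out = staticLotteryNumberWithInfo_alt dataList continousInfo leaveOutInfo
instance (dataList : List (List Int)) (continousInfo : List (List Int)) (leaveOutInfo : List (List Int)) (out : List (String × List (String × Int))) : Decidable (Spec_staticLotteryNumberWithInfo dataList continousInfo leaveOutInfo out) := by unfold Spec_staticLotteryNumberWithInfo; infer_instance

-- ===== CLAIM (what is proved, stated in full; the proofs are below) =====
def Claim_equal_staticLotteryNumberWithInfo : Prop := ∀ (dataList : List (List Int)) (continousInfo : List (List Int)) (leaveOutInfo : List (List Int)), Dom_staticLotteryNumberWithInfo dataList continousInfo leaveOutInfo → Pre_staticLotteryNumberWithInfo dataList continousInfo leaveOutInfo → Spec_staticLotteryNumberWithInfo dataList continousInfo leaveOutInfo (staticLotteryNumberWithInfo dataList continousInfo leaveOutInfo)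

-- ===== LEMMAS AND PROOFS =====


lemma if_gt_eq_max (m v : Int) : (if v > m then v else m) = max m v := by omega

lemma aLoop_spec (d c l : List (List Int)) (num : Int) (idx : Nat) (cnt mc ml : Int) :
    aLoop d c l num idx cnt mc ml =
      ((PySem.List.pyRange idx d.length 1).foldl
          (fun a j => if num ∈ PySem.List.pyGetD d j [] then a + 1 else a) cnt,
       (PySem.List.pyRange idx ((d.length : Int) - 1) 1).foldl
          (fun m j => max m (PySem.List.pyGetD (PySem.List.pyGetD c j []) (num - 1) 0)) mc,
       (PySem.List.pyRange idx ((d.length : Int) - 1) 1).foldl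
          (fun m j => max m (PySem.List.pyGetD (PySem.List.pyGetD l j []) (num - 1) 0)) ml) := by
  fun_induction aLoop d c l num idx cnt mc ml with
  | case1 idx cnt mc ml h a1 a2 a3 ih =>
    rw [ih]; push_cast
    have hd : PySem.List.pyGetD d (idx : Int) [] = d[idx] := by
      rw [PySem.List.pyGetD_natCast]; exact List.getD_eq_getElem _ _ h
    by_cases hlast : idx = d.length - 1
    · rw [PySem.List.pyRange_one_cons (show (idx : Int) < d.length by omega),
        PySem.List.pyRange_one_eq_nil (show (d.length : Int) - 1 ≤ idx by omega),
        PySem.List.pyRange_one_eq_nil (show (d.length : Int) - 1 ≤ (idx : Int) + 1 by omega)]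
      simp only [a1, a2, a3, List.foldl_cons, List.foldl_nil, hd]
      simp [hlast]
    · rw [PySem.List.pyRange_one_cons (show (idx : Int) < d.length by omega),
        PySem.List.pyRange_one_cons (show (idx : Int) < (d.length : Int) - 1 by omega)]
      simp only [a1, a2, a3, List.foldl_cons, hd]
      simp [hlast, if_gt_eq_max]
  | case2 idx cnt mc ml h =>
    rw [PySem.List.pyRange_one_eq_nil (show (d.length : Int) ≤ (idx : Int) by omega),
      PySem.List.pyRange_one_eq_nil (show (d.length : Int) - 1 ≤ (idx : Int) by omega)]
    simp


lemma pyGetD_oob (xs : List Int) (k d : Int) (h : (xs.length : Int) ≤ k) :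
    PySem.List.pyGetD xs k d = d := by
  refine PySem.List.pyGetD_of_none _ _ _ ((PySem.List.pyGet?_eq_none_iff _ _).mpr ?_)
  intro hin
  have := hin.2
  omega

lemma getD_setD (cs : List Int) (x k v : Int) (hx0 : 0 ≤ x) (hx : x < (cs.length : Int))
    (hk : 0 ≤ k) :
    PySem.List.pyGetD (PySem.List.pySetD cs x v) k 0 =
      if k = x then v else PySem.List.pyGetD cs k 0 := by
  rw [PySem.List.pySetD_of_nonneg _ _ hx0]
  by_cases hkl : k < (cs.length : Int)
  · rw [PySem.List.pyGetD_eq_getElem _ _ hk (by simpa using hkl),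
      PySem.List.pyGetD_eq_getElem _ _ hk hkl, List.getElem_set]
    have : (x.toNat = k.toNat) ↔ (k = x) := by omega
    split_ifs with h1 h2 h2 <;> first | rfl | omega
  · have hge : (cs.length : Int) ≤ k := by omega
    rw [pyGetD_oob _ _ _ (by simpa using hge), pyGetD_oob _ _ _ hge, if_neg (by omega)]

lemma length_bIncRow (s : List Int) : ∀ cs : List Int, (bIncRow cs s).length = cs.length := by
  induction s with
  | nil => intro cs; rfl
  | cons x t ih =>
    intro cs
    show (bIncRow (if 1 ≤ x ∧ x ≤ 35 then PySem.List.pySetD cs x (PySem.List.pyGetD cs x 0 + 1) else cs) t).length = _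
    rw [ih]
    split_ifs <;> simp [PySem.List.length_pySetD]

lemma getD_bIncRow (s : List Int) (k : Int) (hk1 : 1 ≤ k) (hk35 : k ≤ 35) :
    ∀ cs : List Int, cs.length = 36 →
    PySem.List.pyGetD (bIncRow cs s) k 0 = PySem.List.pyGetD cs k 0 + (s.count k : Int) := by
  induction s with
  | nil => intro cs _; simp [bIncRow]
  | cons x t ih =>
    intro cs hlen
    show PySem.List.pyGetD (bIncRow (if 1 ≤ x ∧ x ≤ 35 then PySem.List.pySetD cs x (PySem.List.pyGetD cs x 0 + 1) else cs) t) k 0 = _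
    by_cases hx : 1 ≤ x ∧ x ≤ 35
    · rw [if_pos hx, ih _ (by rw [PySem.List.length_pySetD]; exact hlen)]
      rw [getD_setD _ _ _ _ (by omega) (by rw [hlen]; omega) (by omega)]
      by_cases hxk : k = x
      · subst hxk
        rw [if_pos rfl]
        have hc : (k :: t).count k = t.count k + 1 := by simp
        rw [hc]; push_cast; omega
      · rw [if_neg hxk]
        have hxk' : ¬ x = k := fun h => hxk h.symm
        have hc : (x :: t).count k = t.count k := by simp [hxk']
        rw [hc]
    · have hxk' : ¬ x = k := by
        intro he; exact hx ⟨by omega, by omega⟩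
      have hc : (x :: t).count k = t.count k := by simp [hxk']
      rw [if_neg hx, ih _ hlen, hc]

lemma counts_fold (d : List (List Int)) (k : Int) (hk1 : 1 ≤ k) (hk35 : k ≤ 35) :
    ∀ cs : List Int, cs.length = 36 →
    PySem.List.pyGetD (d.foldl (fun cs row => bIncRow cs (PySem.Set.ofList row)) cs) k 0 =
      d.foldl (fun a row => if k ∈ row then a + 1 else a) (PySem.List.pyGetD cs k 0) := by
  induction d with
  | nil => intro cs _; rfl
  | cons row t ih =>
    intro cs hlen
    simp only [List.foldl_cons]
    rw [ih _ (by rw [length_bIncRow]; exact hlen), getD_bIncRow _ _ hk1 hk35 _ hlen]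
    have hcnt : ((PySem.Set.ofList row).count k : Int) = if k ∈ row then 1 else 0 := by
      by_cases hm : k ∈ row
      · rw [if_pos hm, List.count_eq_one_of_mem (PySem.Set.nodup_ofList row)
          ((PySem.Set.mem_ofList row k).mpr hm)]; rfl
      · rw [if_neg hm, List.count_eq_zero_of_not_mem
          (fun hc => hm ((PySem.Set.mem_ofList row k).mp hc))]; rfl
    rw [hcnt]
    split_ifs <;> simp

lemma length_bMaxStep (m row : List Int) : (bMaxStep m row).length = min m.length row.length := by
  simp [bMaxStep]

lemma getD_bMaxStep (m row : List Int) (k : Int) (hk0 : 0 ≤ k)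
    (hkm : k < (m.length : Int)) (hkr : k < (row.length : Int)) :
    PySem.List.pyGetD (bMaxStep m row) k 0 =
      max (PySem.List.pyGetD m k 0) (PySem.List.pyGetD row k 0) := by
  rw [PySem.List.pyGetD_eq_getElem _ _ hk0 (by rw [length_bMaxStep]; push_cast; omega),
    PySem.List.pyGetD_eq_getElem _ _ hk0 hkm, PySem.List.pyGetD_eq_getElem _ _ hk0 hkr]
  simp [bMaxStep]

lemma max_fold (rows : List (List Int)) (hrows : ∀ r ∈ rows, 35 ≤ r.length)
    (k : Int) (hk0 : 0 ≤ k) (hk : k < 35) :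
    ∀ m : List Int, m.length = 35 →
    PySem.List.pyGetD (rows.foldl bMaxStep m) k 0 =
      rows.foldl (fun a r => max a (PySem.List.pyGetD r k 0)) (PySem.List.pyGetD m k 0) := by
  induction rows with
  | nil => intro m _; rfl
  | cons r t ih =>
    intro m hm
    have hr : 35 ≤ r.length := hrows r (by simp)
    simp only [List.foldl_cons]
    rw [ih (fun q hq => hrows q (by simp [hq])) _
        (by rw [length_bMaxStep, hm]; omega),
      getD_bMaxStep _ _ _ hk0 (by rw [hm]; push_cast; omega) (by omega)]

lemma fold_pyRange_take {β : Type} (c : List (List Int)) (n : Nat) (hn : n ≤ c.length)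
    (f : β → List Int → β) (init : β) :
    (PySem.List.pyRange 0 (n : Int) 1).foldl (fun acc j => f acc (PySem.List.pyGetD c j [])) init
      = (c.take n).foldl f init := by
  have hcongr : (PySem.List.pyRange 0 (n : Int) 1).foldl
      (fun acc j => f acc (PySem.List.pyGetD c j [])) init
      = (PySem.List.pyRange 0 (n : Int) 1).foldl
        (fun acc j => f acc (PySem.List.pyGetD (c.take n) j [])) init := by
    apply PySem.List.foldl_congr_mem
    intro acc j hj
    rw [PySem.List.mem_pyRange_one] at hj
    congr 1
    rw [PySem.List.pyGetD_eq_getElem _ _ hj.1 (by omega),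
      PySem.List.pyGetD_eq_getElem _ _ hj.1 (by simp [hn]; omega)]
    exact (List.getElem_take).symm
  rw [hcongr, show ((n : Int)) = (((c.take n).length : Nat) : Int) by simp [hn],
    PySem.List.foldl_pyRange_zero_pyGetD' (c.take n) [] f init]

lemma getD_replicate_zero (k : Int) (n : Nat) (hk0 : 0 ≤ k) (hk : k < (n : Int)) :
    PySem.List.pyGetD (List.replicate n (0 : Int)) k 0 = 0 := by
  rw [PySem.List.pyGetD_eq_getElem _ _ hk0 (by simpa using hk)]
  simp

lemma dict3_items (a b e : Int) :
    (((PySem.Dict.empty.insert "countsNumber" a).insert "maxContinous" b).insert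
        "maxLeaveNumber" e).items =
      [("countsNumber", a), ("maxContinous", b), ("maxLeaveNumber", e)] := by
  rw [PySem.Dict.items_insert_of_not_contains _ _ (by
      simp only [PySem.Dict.contains_insert, PySem.Dict.contains_empty]; decide),
    PySem.Dict.items_insert_of_not_contains _ _ (by
      simp only [PySem.Dict.contains_insert, PySem.Dict.contains_empty]; decide),
    PySem.Dict.items_insert_of_not_contains _ _ (PySem.Dict.contains_empty _)]
  rfl


-- ===== VERDICT (by name: the statement is the Claim_ definition above) =====
lemma A_eq_map (d c l : List (List Int)) :
    staticLotteryNumberWithInfo d c l =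
      (PySem.List.pyRange 1 36 1).map (fun i =>
        (PySem.Int.toStr i,
         [("countsNumber", (aLoop d c l i 0 0 0 0).1),
          ("maxContinous", (aLoop d c l i 0 0 0 0).2.1),
          ("maxLeaveNumber", (aLoop d c l i 0 0 0 0).2.2)])) := by
  unfold staticLotteryNumberWithInfo
  simp only [dict3_items]
  rw [PySem.Dict.items_foldl_insert_fresh (PySem.List.pyRange 1 36 1) PySem.Int.toStr _ _
    (fun a _ => PySem.Dict.contains_empty _) (by decide)]
  rfl

theorem staticLotteryNumberWithInfo_spec : Claim_equal_staticLotteryNumberWithInfo := by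
  intro d c l _ hpre
  obtain ⟨hc, hl, hcr, hlr⟩ := hpre
  unfold Spec_staticLotteryNumberWithInfo
  rw [A_eq_map]
  unfold staticLotteryNumberWithInfo_alt
  simp only []
  apply List.map_congr_left
  intro i hi
  rw [PySem.List.mem_pyRange_one] at hi
  have spec := aLoop_spec d c l i 0 0 0 0
  push_cast at spec
  have hrange : PySem.List.pyRange 0 ((d.length : Int) - 1) 1
      = PySem.List.pyRange 0 (((d.length - 1 : Nat) : Nat) : Int) 1 := by
    rcases Nat.eq_zero_or_pos d.length with h0 | hpos
    · rw [PySem.List.pyRange_one_eq_nil (by omega), PySem.List.pyRange_one_eq_nil (by omega)]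
    · congr 1; omega
  have hcnt : (aLoop d c l i 0 0 0 0).1 =
      PySem.List.pyGetD (d.foldl (fun cs row => bIncRow cs (PySem.Set.ofList row))
        (List.replicate 36 0)) i 0 := by
    rw [spec]
    rw [counts_fold d i (by omega) (by omega) _ (by simp),
      getD_replicate_zero i 36 (by omega) (by omega),
      fold_pyRange_take d d.length le_rfl (fun a row => if i ∈ row then a + 1 else a) 0,
      List.take_length]
  have hmaxC : (aLoop d c l i 0 0 0 0).2.1 =
      PySem.List.pyGetD ((PySem.List.pyRange 0 ((d.length : Int) - 1) 1).foldl
        (fun m idx => bMaxStep m (PySem.List.pyGetD c idx [])) (List.replicate 35 0)) (i - 1) 0 := by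
    rw [spec]
    rw [hrange, fold_pyRange_take c (d.length - 1) hc bMaxStep (List.replicate 35 0),
      max_fold (c.take (d.length - 1)) hcr (i - 1) (by omega) (by omega) _ (by simp),
      getD_replicate_zero (i - 1) 35 (by omega) (by omega),
      fold_pyRange_take c (d.length - 1) hc
        (fun m row => max m (PySem.List.pyGetD row (i - 1) 0)) 0]
  have hmaxL : (aLoop d c l i 0 0 0 0).2.2 =
      PySem.List.pyGetD ((PySem.List.pyRange 0 ((d.length : Int) - 1) 1).foldl
        (fun m idx => bMaxStep m (PySem.List.pyGetD l idx [])) (List.replicate 35 0)) (i - 1) 0 := by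
    rw [spec]
    rw [hrange, fold_pyRange_take l (d.length - 1) hl bMaxStep (List.replicate 35 0),
      max_fold (l.take (d.length - 1)) hlr (i - 1) (by omega) (by omega) _ (by simp),
      getD_replicate_zero (i - 1) 35 (by omega) (by omega),
      fold_pyRange_take l (d.length - 1) hl
        (fun m row => max m (PySem.List.pyGetD row (i - 1) 0)) 0]
  rw [hcnt, hmaxC, hmaxL,
    PySem.List.foldl_prod_mk (fun m idx => bMaxStep m (PySem.List.pyGetD c idx []))
      (fun m idx => bMaxStep m (PySem.List.pyGetD l idx []))]
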